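-- pv_equiv track=rewrite | github.com/jaxparrow07/medical-rag-hackathon | src/retrieval/context_expander.py | _find_chunk_index
-- ===== SOURCE A (Python) =====
-- from typing import List, Dict, Optional
--
-- def _find_chunk_index(chunks: List[str], target_text: str) -> int:
--     """
--     Find the index of a chunk in a list
--
--     Args:
--         chunks: List of chunk texts
--         target_text: Text to find
--
--     Returns:
--         Index of chunk, or -1 if not found
--     """
--     # Exact match first
--     try:
--         return chunks.index(target_text)
--     except ValueError:
--         pass
--
--     # Fuzzy match (first 100 chars)
--     target_prefix = target_text[:100]
--     for i, chunk in enumerate(chunks):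
--         if chunk[:100] == target_prefix:
--             return i
--
--     return -1
-- ===== SOURCE B (Python) =====
-- def _find_chunk_index(chunks, target_text):
--     """Single pass: exact match anywhere wins immediately; otherwise the
--     first prefix (100-char) match index is remembered and returned at the end."""
--     target_prefix = target_text[:100]
--     prefix_idx = -1
--     for i, chunk in enumerate(chunks):
--         if chunk == target_text:
--             return i
--         if prefix_idx == -1 and chunk[:100] == target_prefix:
--             prefix_idx = i
--     return prefix_idx
-- ===== Notes on version B (the rewrite author's own statement) =====
-- stated objective: alternative
-- what changed: Replaces A's two sequential scans (list.index, then a separate prefix-match loop) with one merged pass that returns on an exact match and remembers the first prefix-match index in an accumulator.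
import Mathlib
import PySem

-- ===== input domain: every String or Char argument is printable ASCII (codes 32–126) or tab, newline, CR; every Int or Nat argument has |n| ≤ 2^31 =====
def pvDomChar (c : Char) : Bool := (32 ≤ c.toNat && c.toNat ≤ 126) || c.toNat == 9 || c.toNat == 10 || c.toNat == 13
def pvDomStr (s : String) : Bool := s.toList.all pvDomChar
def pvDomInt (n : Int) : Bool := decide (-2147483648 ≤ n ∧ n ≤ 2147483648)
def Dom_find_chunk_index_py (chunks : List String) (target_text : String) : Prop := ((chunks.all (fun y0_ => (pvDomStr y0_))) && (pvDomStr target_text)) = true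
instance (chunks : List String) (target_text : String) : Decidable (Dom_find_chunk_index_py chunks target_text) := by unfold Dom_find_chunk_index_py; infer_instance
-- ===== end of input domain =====

-- B merges A's two sequential scans into one pass with a remembered first-prefix-match index; same O(n) cost, single traversal.

-- ===== PORT A =====
-- A's second loop: scan for the first chunk whose first 100 chars equal the target prefix
def pvFindPrefixLoop (tpfx : String) : List String → Nat → Int
  | [], _ => -1
  | c :: rest, i =>
    if PySem.Str.slice c none (some 100) = tpfx then (i : Int)
    else pvFindPrefixLoop tpfx rest (i + 1)

def find_chunk_index_py (chunks : List String) (target_text : String) : Int :=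
  match PySem.List.index? chunks target_text with
  | some i => (i : Int)
  | none => pvFindPrefixLoop (PySem.Str.slice target_text none (some 100)) chunks 0

-- ===== PORT B =====
-- B's single loop: exact match returns immediately, first prefix match recorded in pidx
def pvFindOnePass (tgt tpfx : String) : List String → Nat → Int → Int
  | [], _, pidx => pidx
  | c :: rest, i, pidx =>
    if c = tgt then (i : Int)
    else pvFindOnePass tgt tpfx rest (i + 1)
      (if pidx = -1 ∧ PySem.Str.slice c none (some 100) = tpfx then (i : Int) else pidx)

def find_chunk_index_py_alt (chunks : List String) (target_text : String) : Int :=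
  pvFindOnePass target_text (PySem.Str.slice target_text none (some 100)) chunks 0 (-1)

-- ===== PRECONDITION & SPEC =====
def Spec_find_chunk_index_py (chunks : List String) (target_text : String) (out : Int) : Prop := out = find_chunk_index_py_alt chunks target_text
instance (chunks : List String) (target_text : String) (out : Int) : Decidable (Spec_find_chunk_index_py chunks target_text out) := by unfold Spec_find_chunk_index_py; infer_instance

-- ===== CLAIM (what is proved, stated in full; the proofs are below) =====
def Claim_equal_find_chunk_index_py : Prop := ∀ (chunks : List String) (target_text : String), Dom_find_chunk_index_py chunks target_text → Spec_find_chunk_index_py chunks target_text (find_chunk_index_py chunks target_text)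

-- ===== LEMMAS AND PROOFS =====

-- If an exact match exists at offset j, B's one-pass loop returns i+j regardless of the accumulator.
theorem pvOnePass_exact (tgt tpfx : String) :
    ∀ (xs : List String) (j : Nat), PySem.List.index? xs tgt = some j →
      ∀ (i : Nat) (p : Int), pvFindOnePass tgt tpfx xs i p = ((i + j : Nat) : Int) := by
  intro xs
  induction xs with
  | nil => intro j h; simp [PySem.List.index?_eq_idxOf?, List.idxOf?] at h
  | cons c rest ih =>
    intro j h i p
    by_cases hc : c = tgt
    · subst hc
      rw [PySem.List.index?_cons_self] at h
      cases h
      simp [pvFindOnePass]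
    · rw [PySem.List.index?_cons_of_ne rest hc] at h
      cases hj : PySem.List.index? rest tgt with
      | none => rw [hj] at h; simp at h
      | some j' =>
        rw [hj] at h; simp at h
        subst h
        simp only [pvFindOnePass, if_neg hc]
        rw [ih j' hj]
        congr 1
        omega

-- If no exact match remains and the accumulator is nonnegative, B's loop keeps it.
theorem pvOnePass_keep (tgt tpfx : String) :
    ∀ (xs : List String), tgt ∉ xs →
      ∀ (i : Nat) (p : Int), 0 ≤ p → pvFindOnePass tgt tpfx xs i p = p := by
  intro xs
  induction xs with
  | nil => intro _ i p _; simp [pvFindOnePass]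
  | cons c rest ih =>
    intro hmem i p hp
    have hc : c ≠ tgt := by intro h; exact hmem (h ▸ List.mem_cons_self)
    have hrest : tgt ∉ rest := fun h => hmem (List.mem_cons_of_mem _ h)
    have hne : ¬ (p = -1) := by omega
    simp only [pvFindOnePass, if_neg hc]
    rw [if_neg (by simp [hne])]
    exact ih hrest (i + 1) p hp

-- With no exact match, B's loop started at -1 computes exactly A's prefix scan.
theorem pvOnePass_prefix (tgt tpfx : String) :
    ∀ (xs : List String), tgt ∉ xs →
      ∀ (i : Nat), pvFindOnePass tgt tpfx xs i (-1) = pvFindPrefixLoop tpfx xs i := by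
  intro xs
  induction xs with
  | nil => intro _ i; simp [pvFindOnePass, pvFindPrefixLoop]
  | cons c rest ih =>
    intro hmem i
    have hc : c ≠ tgt := by intro h; exact hmem (h ▸ List.mem_cons_self)
    have hrest : tgt ∉ rest := fun h => hmem (List.mem_cons_of_mem _ h)
    simp only [pvFindOnePass, pvFindPrefixLoop, if_neg hc]
    by_cases hpfx : PySem.Str.slice c none (some 100) = tpfx
    · rw [if_pos ⟨trivial, hpfx⟩, if_pos hpfx]
      exact pvOnePass_keep tgt tpfx rest hrest (i + 1) (i : Int) (by positivity)
    · rw [if_neg (by simp [hpfx]), if_neg hpfx]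
      exact ih hrest (i + 1)

-- ===== VERDICT (by name: the statement is the Claim_ definition above) =====
theorem find_chunk_index_py_spec : Claim_equal_find_chunk_index_py := by
  intro chunks target_text _
  show find_chunk_index_py chunks target_text = find_chunk_index_py_alt chunks target_text
  unfold find_chunk_index_py find_chunk_index_py_alt
  cases hidx : PySem.List.index? chunks target_text with
  | some j =>
    rw [pvOnePass_exact target_text _ chunks j hidx 0 (-1)]
    simp
  | none =>
    have : target_text ∉ chunks := (PySem.List.index?_eq_none_iff chunks target_text).mp hidx
    rw [pvOnePass_prefix target_text _ chunks this 0]
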